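-- pv_equiv track=rewrite | github.com/vedantparmar12/Code-gaurdian | utils/web_search.py | _prioritize_official_sources
-- ===== SOURCE A (Python) =====
-- from typing import List, Optional
--
-- def _prioritize_official_sources(urls: List[str], library_name: str) -> List[str]:
--     """Prioritize official documentation sources."""
--     official_patterns = [
--         f"{library_name}.org",
--         f"{library_name}.io",
--         f"{library_name}.dev",
--         f"{library_name}.com",
--         f"docs.{library_name}",
--         f"{library_name}.readthedocs.io",
--         f"{library_name}.github.io",
--     ]
--
--     official_urls = []
--     other_urls = []
--
--     for url in urls:
--         url_lower = url.lower()
--         is_official = any(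
--             pattern.lower() in url_lower
--             for pattern in official_patterns
--         )
--
--         if is_official:
--             official_urls.append(url)
--         else:
--             other_urls.append(url)
--
--     # Return official URLs first, then others
--     return official_urls + other_urls
-- ===== SOURCE B (Python) =====
-- from typing import List
--
--
-- def _prioritize_official_sources(urls: List[str], library_name: str) -> List[str]:
--     """Prioritize official documentation sources (stable sort, no explicit buckets)."""
--     official_patterns = [
--         f"{library_name}.org",
--         f"{library_name}.io",
--         f"{library_name}.dev",
--         f"{library_name}.com",
--         f"docs.{library_name}",
--         f"{library_name}.readthedocs.io",
--         f"{library_name}.github.io",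
--     ]
--     return sorted(
--         urls,
--         key=lambda url: not any(
--             pattern.lower() in url.lower() for pattern in official_patterns
--         ),
--     )
-- ===== Notes on version B (the rewrite author's own statement) =====
-- stated objective: simpler
-- what changed: Replaces the explicit two-bucket partition loop with a single stable sort keyed on the negated official-source test; stability makes official URLs precede the rest in original relative order.
import Mathlib
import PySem

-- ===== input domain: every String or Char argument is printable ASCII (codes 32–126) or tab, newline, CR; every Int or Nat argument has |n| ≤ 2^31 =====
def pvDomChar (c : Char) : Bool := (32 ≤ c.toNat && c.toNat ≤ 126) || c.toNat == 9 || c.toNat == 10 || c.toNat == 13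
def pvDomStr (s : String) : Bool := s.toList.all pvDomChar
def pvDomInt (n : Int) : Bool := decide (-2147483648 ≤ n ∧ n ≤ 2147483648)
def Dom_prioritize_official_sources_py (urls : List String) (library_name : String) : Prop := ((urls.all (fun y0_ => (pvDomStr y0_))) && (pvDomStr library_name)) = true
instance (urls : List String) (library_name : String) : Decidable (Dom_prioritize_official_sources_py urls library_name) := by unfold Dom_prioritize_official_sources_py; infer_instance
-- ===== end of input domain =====

-- B replaces A's explicit two-bucket partition loop with one stable sort on the negated
-- official-source key; same return value, simpler shape (objective: simpler, not faster).

-- ===== PORT A =====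
-- the official_patterns list (identical literal f-strings in A and in B)
def pvPatterns (library_name : String) : List String :=
  [library_name ++ ".org", library_name ++ ".io", library_name ++ ".dev",
   library_name ++ ".com", "docs." ++ library_name,
   library_name ++ ".readthedocs.io", library_name ++ ".github.io"]

def prioritize_official_sources_py (urls : List String) (library_name : String) : List String :=
  let official_patterns := pvPatterns library_name
  let acc := urls.foldl (fun (acc : List String × List String) url =>
      let url_lower := PySem.Str.lower url
      let is_official := official_patterns.any (fun pattern =>
        PySem.Str.isIn (PySem.Str.lower pattern) url_lower)
      if is_official then (acc.1 ++ [url], acc.2) else (acc.1, acc.2 ++ [url]))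
    ([], [])
  acc.1 ++ acc.2

-- ===== PORT B =====
def prioritize_official_sources_py_alt (urls : List String) (library_name : String) : List String :=
  let official_patterns := pvPatterns library_name
  PySem.List.sorted urls (fun url =>
    !(official_patterns.any (fun pattern =>
        PySem.Str.isIn (PySem.Str.lower pattern) (PySem.Str.lower url))))

-- ===== PRECONDITION & SPEC =====
def Spec_prioritize_official_sources_py (urls : List String) (library_name : String) (out : List String) : Prop := out = prioritize_official_sources_py_alt urls library_name
instance (urls : List String) (library_name : String) (out : List String) : Decidable (Spec_prioritize_official_sources_py urls library_name out) := by unfold Spec_prioritize_official_sources_py; infer_instance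

-- ===== CLAIM (what is proved, stated in full; the proofs are below) =====
def Claim_equal_prioritize_official_sources_py : Prop := ∀ (urls : List String) (library_name : String), Dom_prioritize_official_sources_py urls library_name → Spec_prioritize_official_sources_py urls library_name (prioritize_official_sources_py urls library_name)

-- ===== LEMMAS AND PROOFS =====

-- inserting past a prefix none of whose elements x must precede
theorem insertBy_append {α : Type} (before : α → α → Bool) (x : α) (F T : List α)
    (hF : ∀ y ∈ F, before x y = false) :
    PySem.List.insertBy before x (F ++ T) = F ++ PySem.List.insertBy before x T := by
  induction F with
  | nil => rfl
  | cons f fs ih =>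
    simp only [List.cons_append, PySem.List.insertBy]
    rw [hF f (by simp)]
    simp only [Bool.false_eq_true, if_false]
    rw [ih (fun y hy => hF y (by simp [hy]))]

-- the insertion-sort loop with a Bool key keeps the list partitioned: false-key block, then true-key block
theorem sorted_loop_partition {α : Type} (k : α → Bool) :
    ∀ (rest F T : List α), (∀ y ∈ F, k y = false) → (∀ y ∈ T, k y = true) →
    rest.foldl (fun acc x => PySem.List.insertBy (fun a b => decide (k a < k b)) x acc) (F ++ T) =
      (F ++ rest.filter (fun u => !k u)) ++ (T ++ rest.filter (fun u => k u)) := by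
  intro rest
  induction rest with
  | nil => intro F T _ _; simp
  | cons x xs ih =>
    intro F T hF hT
    simp only [List.foldl_cons]
    by_cases hx : k x = true
    · have hall : ∀ y ∈ F ++ T, (fun a b => decide (k a < k b)) x y = false := by
        intro y _; simp [hx, Bool.lt_iff]
      rw [PySem.List.insertBy_of_forall_not_before _ _ _ hall, List.append_assoc]
      rw [ih F (T ++ [x]) hF (by intro y hy; rcases List.mem_append.1 hy with h | h
                                 · exact hT y h
                                 · simp_all)]
      simp [hx]
    · have hx' : k x = false := by simpa using hx
      have hpre : ∀ y ∈ F, (fun a b => decide (k a < k b)) x y = false := by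
        intro y hy; simp [hx', hF y hy]
      rw [insertBy_append _ _ _ _ hpre]
      have hins : PySem.List.insertBy (fun a b => decide (k a < k b)) x T = x :: T := by
        cases T with
        | nil => simp [PySem.List.insertBy]
        | cons t ts =>
          simp only [PySem.List.insertBy]
          rw [if_pos (by simp [hx', hT t (by simp), Bool.lt_iff])]
      rw [hins, show F ++ x :: T = (F ++ [x]) ++ T by simp]
      rw [ih (F ++ [x]) T (by intro y hy; rcases List.mem_append.1 hy with h | h
                              · exact hF y h
                              · simp_all) hT]
      simp [hx']

-- A's partition loop, characterised
theorem a_loop_partition {α : Type} (off : α → Bool) :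
    ∀ (rest : List α) (o t : List α),
    rest.foldl (fun (acc : List α × List α) x =>
        if off x then (acc.1 ++ [x], acc.2) else (acc.1, acc.2 ++ [x])) (o, t) =
      (o ++ rest.filter off, t ++ rest.filter (fun u => !off u)) := by
  intro rest
  induction rest with
  | nil => intro o t; simp
  | cons x xs ih =>
    intro o t
    simp only [List.foldl_cons]
    by_cases hx : off x = true
    · rw [if_pos hx, ih]; simp [hx]
    · have hx' : off x = false := by simpa using hx
      rw [if_neg (by simp [hx']), ih]; simp [hx']

-- ===== VERDICT (by name: the statement is the Claim_ definition above) =====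
theorem prioritize_official_sources_py_spec : Claim_equal_prioritize_official_sources_py := by
  intro urls library_name _
  unfold Spec_prioritize_official_sources_py prioritize_official_sources_py prioritize_official_sources_py_alt
  set off : String → Bool := fun url =>
    (pvPatterns library_name).any (fun pattern =>
      PySem.Str.isIn (PySem.Str.lower pattern) (PySem.Str.lower url)) with hoff
  simp only []
  rw [a_loop_partition off urls [] []]
  rw [PySem.List.sorted_eq_foldl_insertBy]
  rw [show urls.foldl (fun acc x =>
        PySem.List.insertBy (fun a b => decide ((!off a) < (!off b))) x acc) [] =
      urls.foldl (fun acc x =>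
        PySem.List.insertBy (fun a b => decide ((!off a) < (!off b))) x acc) ([] ++ []) by simp]
  rw [sorted_loop_partition (fun u => !off u) urls [] [] (by simp) (by simp)]
  simp
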